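-- pv_equiv track=rewrite | github.com/JimJin2050/AdventOfCodePython | day8.py | sum_of_output_base_on_fix_configuration
-- ===== SOURCE A (Python) =====
-- def sum_of_output_base_on_fix_configuration(outputs_list, signals_list):
--     total = 0
--     for index, output in enumerate(outputs_list):
--         seven_segment_map = get_seven_segment_mapping(signals_list[index])
--         digit_lenth = len(output)
--         for idx, digit in enumerate(output):
--             digit_map_key = "".join(sorted(list(digit)))
--             total += seven_segment_map.get(digit_map_key) * 10 ** (digit_lenth - idx - 1)
--
--     return total
--
-- def get_seven_segment_mapping(signal_pattens):
--     digits, segments = [""] * 10, ['0'] * 7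
--     signals_length_is_5, signals_length_is_6 = [], []
--
--     for signal in signal_pattens:
--         key = "".join(sorted(list(signal)))
--         if len(signal) == 2:
--             digits[1] = key
--         elif len(signal) == 3:
--             digits[7] = key
--         elif len(signal) == 4:
--             digits[4] = key
--         elif len(signal) == 5:
--             signals_length_is_5.append(key)
--         elif len(signal) == 6:
--             signals_length_is_6.append(key)
--         elif len(signal) == 7:
--             digits[8] = key
--         else:
--             raise ValueError("Invalid signal pattern of seven-segments")
--
--     for signal in signals_length_is_6:
--         intersection = set(signal).intersection(set(digits[1]))
--         if len(intersection) == 1: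
--             digits[6] = signal
--             segments[2] = set(digits[1]).difference(intersection).pop()
--         else:
--             diff = set(digits[4]).difference(set(signal))
--             if len(diff) == 0:
--                 digits[9] = signal
--                 segments[4] = set(digits[8]).difference(set(signal)).pop()
--             else:
--                 digits[0] = signal
--
--     for signal in signals_length_is_5:
--         if segments[4] in signal:
--             digits[2] = signal
--         elif segments[2] in signal:
--             digits[3] = signal
--         else:
--             digits[5] = signal
--
--     return dict(zip(digits, [idx for idx in range(len(digits))]))
-- ===== SOURCE B (Python) =====
-- def get_seven_segment_mapping(signal_pattens):
--     for patt in signal_pattens: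
--         if not 2 <= len(patt) <= 7:
--             raise ValueError("Invalid signal pattern of seven-segments")
--     freq = {}
--     for patt in signal_pattens:
--         for ch in patt:
--             freq[ch] = freq.get(ch, 0) + 1
--     table = {17: 1, 25: 7, 30: 4, 34: 2, 37: 5, 39: 3, 41: 6, 42: 0, 45: 9, 49: 8}
--     return {"".join(sorted(patt)): table[sum(freq[ch] for ch in patt)]
--             for patt in signal_pattens}
--
-- def sum_of_output_base_on_fix_configuration(outputs_list, signals_list):
--     total = 0
--     for output, patterns in zip(outputs_list, signals_list):
--         mapping = get_seven_segment_mapping(patterns)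
--         value = 0
--         for digit in output:
--             value = value * 10 + mapping["".join(sorted(digit))]
--         total += value
--     return total
-- ===== Notes on version B (the rewrite author's own statement) =====
-- stated objective: alternative
-- what changed: The digit map is computed from each pattern's summed global letter frequencies via a fixed sum-to-digit table (one counting pass) instead of A's three-pass set-intersection deduction, and each output number is accumulated by Horner's rule over zipped rows instead of indexed 10**k weights.
-- outside the precondition, e.g. on sum_of_output_base_on_fix_configuration([['']], [[]]): A returns 9, B raises KeyError; on sum_of_output_base_on_fix_configuration([['ab']], [['ab', 'ab']]): A returns 1, B raises KeyError
import Mathlib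
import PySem

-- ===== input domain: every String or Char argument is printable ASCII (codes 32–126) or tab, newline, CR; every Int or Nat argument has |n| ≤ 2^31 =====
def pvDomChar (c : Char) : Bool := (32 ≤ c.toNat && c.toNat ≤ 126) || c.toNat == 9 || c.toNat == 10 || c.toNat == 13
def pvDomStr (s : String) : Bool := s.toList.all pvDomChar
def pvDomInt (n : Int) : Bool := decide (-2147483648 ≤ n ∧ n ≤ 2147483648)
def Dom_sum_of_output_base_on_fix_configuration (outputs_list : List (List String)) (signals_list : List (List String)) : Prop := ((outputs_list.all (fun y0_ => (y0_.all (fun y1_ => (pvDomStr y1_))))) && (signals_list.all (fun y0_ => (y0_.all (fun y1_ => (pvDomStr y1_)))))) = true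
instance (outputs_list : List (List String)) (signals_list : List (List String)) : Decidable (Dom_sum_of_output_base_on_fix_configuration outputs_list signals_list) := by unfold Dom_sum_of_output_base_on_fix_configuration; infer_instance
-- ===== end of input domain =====

-- B replaces A's three-pass set-deduction of the digit map by a letter-frequency signature with a fixed
-- sum→digit table, and accumulates each output number by Horner's rule over zipped rows (alternative, not timed faster).

-- ===== PORT A =====

-- "".join(sorted(list(x)))
def pvKey (s : String) : String := String.ofList (PySem.List.sorted s.toList (fun c => c) false)

-- first loop of get_seven_segment_mapping: classify signals by length
-- (the final 'else: raise ValueError' aborts A; such inputs are outside Pre_, the port leaves the state unchanged there)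
def pvStep1 (st : List String × List String × List String) (signal : String) : List String × List String × List String :=
  let digits := st.1; let s5 := st.2.1; let s6 := st.2.2
  let key := pvKey signal
  if PySem.Str.len signal = 2 then (PySem.List.pySetD digits 1 key, s5, s6)
  else if PySem.Str.len signal = 3 then (PySem.List.pySetD digits 7 key, s5, s6)
  else if PySem.Str.len signal = 4 then (PySem.List.pySetD digits 4 key, s5, s6)
  else if PySem.Str.len signal = 5 then (digits, s5 ++ [key], s6)
  else if PySem.Str.len signal = 6 then (digits, s5, s6 ++ [key])
  else if PySem.Str.len signal = 7 then (PySem.List.pySetD digits 8 key, s5, s6)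
  else (digits, s5, s6)

-- second loop: resolve the length-6 signals (6 / 9 / 0).
-- set.pop() is ported as .headD '0': exact because Pre_ guarantees the popped sets are singletons.
def pvStep2 (st : List String × List Char) (signal : String) : List String × List Char :=
  let digits := st.1; let segments := st.2
  let inter := PySem.Set.inter (PySem.Set.ofList signal.toList) (PySem.Set.ofList (PySem.List.pyGetD digits 1 "").toList)
  if PySem.Set.len inter = 1 then
    (PySem.List.pySetD digits 6 signal,
     PySem.List.pySetD segments 2 ((PySem.Set.diff (PySem.Set.ofList (PySem.List.pyGetD digits 1 "").toList) inter).headD '0'))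
  else
    let diff := PySem.Set.diff (PySem.Set.ofList (PySem.List.pyGetD digits 4 "").toList) (PySem.Set.ofList signal.toList)
    if PySem.Set.len diff = 0 then
      (PySem.List.pySetD digits 9 signal,
       PySem.List.pySetD segments 4 ((PySem.Set.diff (PySem.Set.ofList (PySem.List.pyGetD digits 8 "").toList) (PySem.Set.ofList signal.toList)).headD '0'))
    else (PySem.List.pySetD digits 0 signal, segments)

-- third loop: resolve the length-5 signals (2 / 3 / 5); 'segments[k] in signal' is char membership
def pvStep3 (segments : List Char) (digits : List String) (signal : String) : List String :=
  if signal.toList.contains (PySem.List.pyGetD segments 4 '0') then PySem.List.pySetD digits 2 signal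
  else if signal.toList.contains (PySem.List.pyGetD segments 2 '0') then PySem.List.pySetD digits 3 signal
  else PySem.List.pySetD digits 5 signal

def pvGetMapping (signal_pattens : List String) : PySem.Dict String Int :=
  let st := signal_pattens.foldl pvStep1 (PySem.List.pyRepeat [""] 10, [], [])
  let st2 := st.2.2.foldl pvStep2 (st.1, PySem.List.pyRepeat ['0'] 7)
  let digits := st.2.1.foldl (pvStep3 st2.2) st2.1
  PySem.Dict.ofList (digits.zip (PySem.List.pyRange 0 (digits.length : Int) 1))

-- inner loop body: seven_segment_map.get(k) is None for a missing key and Python then raises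
-- TypeError on None * int — such inputs are outside Pre_; ported as getD 0.
-- The exponent digit_lenth - idx - 1 is ≥ 0 for every enumerated idx, so .toNat is exact.
def pvAInner (m : PySem.Dict String Int) (L : Int) (t : Int) (q : Int × String) : Int :=
  t + (m.getD (pvKey q.2) 0) * 10 ^ (L - q.1 - 1).toNat

def pvAStep (signals_list : List (List String)) (total : Int) (p : Int × List String) : Int :=
  let seven_segment_map := pvGetMapping (PySem.List.pyGetD signals_list p.1 [])
  let digit_lenth : Int := (p.2.length : Int)
  (PySem.List.enumerate p.2).foldl (pvAInner seven_segment_map digit_lenth) total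

def sum_of_output_base_on_fix_configuration (outputs_list : List (List String)) (signals_list : List (List String)) : Int :=
  (PySem.List.enumerate outputs_list).foldl (pvAStep signals_list) 0

-- ===== PORT B =====

-- Source B: the up-front length guard raises ValueError exactly where A does; outside Pre_ there is no value to port.
-- freq[ch] = freq.get(ch, 0) + 1  and  table[...] / mapping[...] (KeyError outside Pre_) are ported with getD.
def pvGetMappingAlt (signal_pattens : List String) : PySem.Dict String Int :=
  let freq := signal_pattens.foldl (fun freq signal =>
      signal.toList.foldl (fun freq ch => freq.insert ch (freq.getD ch 0 + 1)) freq) PySem.Dict.empty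
  let table : PySem.Dict Int Int :=
    PySem.Dict.ofList [(17,1),(25,7),(30,4),(34,2),(37,5),(39,3),(41,6),(42,0),(45,9),(49,8)]
  PySem.Dict.ofList (signal_pattens.map (fun signal =>
    (pvKey signal, table.getD (signal.toList.foldl (fun acc ch => acc + freq.getD ch 0) 0) 0)))

def pvBStep (total : Int) (p : List String × List String) : Int :=
  let mapping := pvGetMappingAlt p.2
  total + p.1.foldl (fun value digit => value * 10 + mapping.getD (pvKey digit) 0) 0

def sum_of_output_base_on_fix_configuration_alt (outputs_list : List (List String)) (signals_list : List (List String)) : Int :=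
  (outputs_list.zip signals_list).foldl pvBStep 0

-- ===== PRECONDITION & SPEC =====

-- the ten canonical seven-segment patterns, indexed by the digit they display
def pvPats : List (List Char) :=
  [['a','b','c','e','f','g'], ['c','f'], ['a','c','d','e','g'], ['a','c','d','f','g'], ['b','c','d','f'],
   ['a','b','d','f','g'], ['a','b','d','e','f','g'], ['a','c','f'], ['a','b','c','d','e','f','g'], ['a','b','c','d','f','g']]

def pvSubst (σ : List Char) (c : Char) : Char := σ.getD (c.toNat - 97) c
def pvKeyL (s : String) : List Char := PySem.List.sorted s.toList (fun c => c) false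
def pvImgKey (σ : List Char) (p : List Char) : List Char := PySem.List.sorted (p.map (pvSubst σ)) (fun c => c) false
def pvCanonKeys (σ : List Char) : List (List Char) := pvPats.map (pvImgKey σ)

-- a genuine scramble: for some arrangement σ of the seven wires (read off the unique 7-segment signal),
-- the sorted signals are, as a multiset, exactly the σ-images of the ten canonical digit patterns
def pvValidRowB (sigs : List String) : Bool :=
  (PySem.List.permutations (pvKeyL ((sigs.filter (fun s => s.toList.length == 7)).headD "")) 7).any
    (fun σ => σ.length == 7 && decide σ.Nodup && decide ((sigs.map pvKeyL).Perm (pvCanonKeys σ)))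

abbrev pvValidRow (sigs : List String) : Prop := pvValidRowB sigs = true

-- Pre_ excludes the inputs where A raises (a signal length outside 2..7, too few signal rows, an output
-- digit missing from the decoded dict, an empty-set .pop()) and the degenerate non-scramble rows on which
-- A's accidentally-built dict (duplicate or empty keys) still yields a value while B raises KeyError:
-- it admits exactly the rows that are genuine scrambles of the ten seven-segment digit patterns,
-- with every output digit drawn from its row's signals.
def Pre_sum_of_output_base_on_fix_configuration (outputs_list : List (List String)) (signals_list : List (List String)) : Prop :=
  outputs_list.length ≤ signals_list.length ∧
  ∀ p ∈ outputs_list.zip signals_list, pvValidRow p.2 ∧ ∀ digit ∈ p.1, pvKeyL digit ∈ p.2.map pvKeyL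

instance (outputs_list : List (List String)) (signals_list : List (List String)) : Decidable (Pre_sum_of_output_base_on_fix_configuration outputs_list signals_list) := by
  unfold Pre_sum_of_output_base_on_fix_configuration; infer_instance

def pvWitness_sum_of_output_base_on_fix_configuration : List (List String) × List (List String) :=
  ([["cf", "bcdf"]],
   [["abcefg", "cf", "acdeg", "acdfg", "bcdf", "abdfg", "abdefg", "acf", "abcdefg", "abcdfg"]])

def Spec_sum_of_output_base_on_fix_configuration (outputs_list : List (List String)) (signals_list : List (List String)) (out : Int) : Prop := out = sum_of_output_base_on_fix_configuration_alt outputs_list signals_list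
instance (outputs_list : List (List String)) (signals_list : List (List String)) (out : Int) : Decidable (Spec_sum_of_output_base_on_fix_configuration outputs_list signals_list out) := by unfold Spec_sum_of_output_base_on_fix_configuration; infer_instance

-- ===== CLAIM (what is proved, stated in full; the proofs are below) =====
def Claim_equal_sum_of_output_base_on_fix_configuration : Prop := ∀ (outputs_list : List (List String)) (signals_list : List (List String)), Dom_sum_of_output_base_on_fix_configuration outputs_list signals_list → Pre_sum_of_output_base_on_fix_configuration outputs_list signals_list → Spec_sum_of_output_base_on_fix_configuration outputs_list signals_list (sum_of_output_base_on_fix_configuration outputs_list signals_list)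

-- ===== LEMMAS AND PROOFS =====
set_option maxRecDepth 10000

def pvAG : List Char := ['a','b','c','d','e','f','g']

theorem pv_subst_inj (σ : List Char) (h7 : σ.length = 7) (hnd : σ.Nodup) :
    ∀ c ∈ pvAG, ∀ c' ∈ pvAG, pvSubst σ c = pvSubst σ c' → c = c' := by
  have hg : ∀ c ∈ pvAG, ∃ (h : c.toNat - 97 < σ.length), pvSubst σ c = σ[c.toNat - 97] := by
    intro c hc
    have : c.toNat - 97 < σ.length := by
      fin_cases hc <;> simp [h7]
    exact ⟨this, by simp [pvSubst, List.getD_eq_getElem?_getD, List.getElem?_eq_getElem this]⟩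
  intro c hc c' hc' heq
  obtain ⟨h1, e1⟩ := hg c hc
  obtain ⟨h2, e2⟩ := hg c' hc'
  rw [e1, e2] at heq
  have := (List.Nodup.getElem_inj_iff hnd).mp heq
  fin_cases hc <;> fin_cases hc' <;> simp_all

theorem pv_imgKey_perm (σ : List Char) (p : List Char) :
    (pvImgKey σ p).Perm (p.map (pvSubst σ)) := PySem.List.sorted_perm _ _ _

theorem pv_imgKey_length (σ : List Char) (p : List Char) :
    (pvImgKey σ p).length = p.length := by
  rw [(pv_imgKey_perm σ p).length_eq, List.length_map]

theorem pv_imgKey_mem (σ : List Char) (h7 : σ.length = 7) (hnd : σ.Nodup)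
    (p : List Char) (hp : ∀ x ∈ p, x ∈ pvAG) (c0 : Char) (hc0 : c0 ∈ pvAG) :
    pvSubst σ c0 ∈ pvImgKey σ p ↔ c0 ∈ p := by
  rw [(pv_imgKey_perm σ p).mem_iff, List.mem_map]
  constructor
  · rintro ⟨c, hc, he⟩
    rwa [pv_subst_inj σ h7 hnd c (hp c hc) c0 hc0 he] at hc
  · exact fun h => ⟨c0, h, rfl⟩

theorem pv_imgKey_nodup (σ : List Char) (h7 : σ.length = 7) (hnd : σ.Nodup)
    (p : List Char) (hp : ∀ x ∈ p, x ∈ pvAG) (hnp : p.Nodup) :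
    (pvImgKey σ p).Nodup := by
  refine ((pv_imgKey_perm σ p).nodup_iff).mpr ?_
  exact List.Nodup.map_on (fun x hx y hy he => pv_subst_inj σ h7 hnd x (hp x hx) y (hp y hy) he) hnp

theorem pv_countP_mem (σ : List Char) (h7 : σ.length = 7) (hnd : σ.Nodup)
    (p q : List Char) (hp : ∀ x ∈ p, x ∈ pvAG) (hq : ∀ x ∈ q, x ∈ pvAG) :
    (pvImgKey σ p).countP (fun x => (pvImgKey σ q).contains x) = p.countP (fun c => q.contains c) := by
  rw [(pv_imgKey_perm σ p).countP_eq, List.countP_map]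
  refine List.countP_congr (fun c hc => ?_)
  simp only [Function.comp_apply, List.contains_eq_mem, decide_eq_true_eq]
  exact pv_imgKey_mem σ h7 hnd q hq c (hp c hc)

theorem pv_countP_not_mem (σ : List Char) (h7 : σ.length = 7) (hnd : σ.Nodup)
    (p q : List Char) (hp : ∀ x ∈ p, x ∈ pvAG) (hq : ∀ x ∈ q, x ∈ pvAG) :
    (pvImgKey σ p).countP (fun x => !(pvImgKey σ q).contains x) = p.countP (fun c => !q.contains c) := by
  rw [(pv_imgKey_perm σ p).countP_eq, List.countP_map]
  refine List.countP_congr (fun c hc => ?_)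
  simp only [Function.comp_apply, List.contains_eq_mem, Bool.not_eq_true', decide_eq_false_iff_not]
  rw [not_iff_not]
  exact pv_imgKey_mem σ h7 hnd q hq c (hp c hc)

theorem pv_filter_singleton {α : Type} (l : List α) (p : α → Bool) (x : α)
    (hlen : (l.filter p).length = 1) (hx : x ∈ l) (hpx : p x = true) :
    l.filter p = [x] := by
  obtain ⟨a, ha⟩ := List.length_eq_one_iff.mp hlen
  have : x ∈ l.filter p := List.mem_filter.mpr ⟨hx, hpx⟩
  rw [ha] at this ⊢
  simp at this
  rw [this]

def pvP0 : List Char := ['a','b','c','e','f','g']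
def pvP1 : List Char := ['c','f']
def pvP2 : List Char := ['a','c','d','e','g']
def pvP3 : List Char := ['a','c','d','f','g']
def pvP4 : List Char := ['b','c','d','f']
def pvP5 : List Char := ['a','b','d','f','g']
def pvP6 : List Char := ['a','b','d','e','f','g']
def pvP7 : List Char := ['a','c','f']
def pvP8 : List Char := ['a','b','c','d','e','f','g']
def pvP9 : List Char := ['a','b','c','d','f','g']

def pvK (σ : List Char) (p : List Char) : String := String.ofList (pvImgKey σ p)

theorem pv_K_toList (σ p : List Char) : (pvK σ p).toList = pvImgKey σ p := by
  simp [pvK, String.toList_ofList]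

theorem pv_subP0 : ∀ x ∈ pvP0, x ∈ pvAG := by simp [pvP0, pvAG]
theorem pv_ndP0 : pvP0.Nodup := by simp [pvP0]
theorem pv_subP1 : ∀ x ∈ pvP1, x ∈ pvAG := by simp [pvP1, pvAG]
theorem pv_ndP1 : pvP1.Nodup := by simp [pvP1]
theorem pv_subP2 : ∀ x ∈ pvP2, x ∈ pvAG := by simp [pvP2, pvAG]
theorem pv_subP3 : ∀ x ∈ pvP3, x ∈ pvAG := by simp [pvP3, pvAG]
theorem pv_subP4 : ∀ x ∈ pvP4, x ∈ pvAG := by simp [pvP4, pvAG]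
theorem pv_ndP4 : pvP4.Nodup := by simp [pvP4]
theorem pv_subP5 : ∀ x ∈ pvP5, x ∈ pvAG := by simp [pvP5, pvAG]
theorem pv_subP6 : ∀ x ∈ pvP6, x ∈ pvAG := by simp [pvP6, pvAG]
theorem pv_ndP6 : pvP6.Nodup := by simp [pvP6]
theorem pv_subP7 : ∀ x ∈ pvP7, x ∈ pvAG := by simp [pvP7, pvAG]
theorem pv_subP8 : ∀ x ∈ pvP8, x ∈ pvAG := by simp [pvP8, pvAG]
theorem pv_ndP8 : pvP8.Nodup := by simp [pvP8]
theorem pv_subP9 : ∀ x ∈ pvP9, x ∈ pvAG := by simp [pvP9, pvAG]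
theorem pv_ndP9 : pvP9.Nodup := by simp [pvP9]

theorem pv_perm2 {α : Type} {l : List α} {a b : α} (h : l.Perm [a,b]) :
    l = [a,b] ∨ l = [b,a] := by
  match l, h.length_eq with
  | [x, y], _ =>
    have hx : x ∈ [a,b] := h.mem_iff.mp (by simp)
    rcases List.mem_pair.mp hx with rfl | rfl
    · left; have := h.cons_inv; simp [List.perm_singleton.mp this]
    · right
      have h2 : List.Perm [x,y] [x,a] := h.trans (List.Perm.swap x a [])
      have := h2.cons_inv
      simp [List.perm_singleton.mp this]

theorem pv_perm3 {α : Type} {l : List α} {a b c : α} (h : l.Perm [a,b,c]) :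
    l = [a,b,c] ∨ l = [a,c,b] ∨ l = [b,a,c] ∨ l = [b,c,a] ∨ l = [c,a,b] ∨ l = [c,b,a] := by
  match l, h.length_eq with
  | [x, y, z], _ =>
    have hx : x ∈ [a,b,c] := h.mem_iff.mp (by simp)
    have hrb : List.Perm [a,b,c] [b,a,c] := List.Perm.swap b a [c]
    have hrc : List.Perm [a,b,c] [c,a,b] :=
      ((List.Perm.swap c b []).cons a).trans (List.Perm.swap c a [b])
    rcases List.mem_cons.mp hx with rfl | hx'
    · rcases pv_perm2 h.cons_inv with h2 | h2 <;> simp [h2]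
    rcases List.mem_cons.mp hx' with rfl | hx''
    · rcases pv_perm2 (h.trans hrb).cons_inv with h2 | h2 <;> simp [h2]
    rcases List.mem_cons.mp hx'' with rfl | h0
    · rcases pv_perm2 (h.trans hrc).cons_inv with h2 | h2 <;> simp [h2]
    · simp at h0

theorem pv_ofListK (σ : List Char) (h7 : σ.length = 7) (hnd : σ.Nodup) (p : List Char)
    (hp : ∀ x ∈ p, x ∈ pvAG) (hnp : p.Nodup) :
    PySem.Set.ofList (pvImgKey σ p) = pvImgKey σ p :=
  PySem.Set.ofList_eq_self_of_nodup _ (pv_imgKey_nodup σ h7 hnd _ hp hnp)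

theorem pv_diff_singleton (σ : List Char) (h7 : σ.length = 7) (hnd : σ.Nodup)
    (p q : List Char) (hp : ∀ x ∈ p, x ∈ pvAG) (hq : ∀ x ∈ q, x ∈ pvAG)
    (c0 : Char) (hc0 : c0 ∈ pvAG) (hcnt : p.countP (fun c => !q.contains c) = 1)
    (hcp : c0 ∈ p) (hcq : c0 ∉ q) :
    (pvImgKey σ p).filter (fun x => !(pvImgKey σ q).contains x) = [pvSubst σ c0] := by
  refine pv_filter_singleton _ _ _ ?_ ?_ ?_
  · rw [← List.countP_eq_length_filter, pv_countP_not_mem σ h7 hnd p q hp hq, hcnt]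
  · exact (pv_imgKey_mem σ h7 hnd p hp c0 hc0).mpr hcp
  · simp only [List.contains_eq_mem, Bool.not_eq_true', decide_eq_false_iff_not]
    rw [pv_imgKey_mem σ h7 hnd q hq c0 hc0]
    exact hcq

theorem pv_interlen (σ : List Char) (h7 : σ.length = 7) (hnd : σ.Nodup)
    (p q : List Char) (hp : ∀ x ∈ p, x ∈ pvAG) (hq : ∀ x ∈ q, x ∈ pvAG) :
    PySem.Set.len (PySem.Set.inter (pvImgKey σ p) (pvImgKey σ q))
      = (p.countP (fun c => q.contains c) : Int) := by
  simp only [PySem.Set.len, PySem.Set.inter, PySem.Set.contains, ← List.countP_eq_length_filter]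
  rw [pv_countP_mem σ h7 hnd p q hp hq]

theorem pv_difflen (σ : List Char) (h7 : σ.length = 7) (hnd : σ.Nodup)
    (p q : List Char) (hp : ∀ x ∈ p, x ∈ pvAG) (hq : ∀ x ∈ q, x ∈ pvAG) :
    PySem.Set.len (PySem.Set.diff (pvImgKey σ p) (pvImgKey σ q))
      = (p.countP (fun c => !q.contains c) : Int) := by
  simp only [PySem.Set.len, PySem.Set.diff, PySem.Set.contains, ← List.countP_eq_length_filter]
  rw [pv_countP_not_mem σ h7 hnd p q hp hq]

theorem pv_step2_on6 (σ : List Char) (h7 : σ.length = 7) (hnd : σ.Nodup)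
    (D : List String) (seg : List Char) (h1 : PySem.List.pyGetD D 1 "" = pvK σ pvP1) :
    pvStep2 (D, seg) (pvK σ pvP6)
      = (PySem.List.pySetD D 6 (pvK σ pvP6), PySem.List.pySetD seg 2 (pvSubst σ 'c')) := by
  unfold pvStep2
  have hof6 := pv_ofListK σ h7 hnd pvP6 pv_subP6 pv_ndP6
  have hof1 := pv_ofListK σ h7 hnd pvP1 pv_subP1 pv_ndP1
  simp only [h1, pv_K_toList, hof6, hof1]
  rw [pv_interlen σ h7 hnd pvP6 pvP1 pv_subP6 pv_subP1]
  have hc : pvP6.countP (fun c => pvP1.contains c) = 1 := by rfl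
  rw [hc]
  rw [if_pos (by norm_num)]
  have hdiff : PySem.Set.diff (pvImgKey σ pvP1)
      (PySem.Set.inter (pvImgKey σ pvP6) (pvImgKey σ pvP1)) = [pvSubst σ 'c'] := by
    show (pvImgKey σ pvP1).filter _ = _
    rw [List.filter_congr (l := pvImgKey σ pvP1)
      (q := fun x => !(pvImgKey σ pvP6).contains x) (fun x hx => by
        simp [PySem.Set.inter, PySem.Set.contains, List.contains_eq_mem, List.mem_filter, hx])]
    exact pv_diff_singleton σ h7 hnd pvP1 pvP6 pv_subP1 pv_subP6 'c' (by simp [pvAG])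
      (by rfl) (by simp [pvP1]) (by simp [pvP6])
  rw [hdiff]
  rfl

theorem pv_step2_on9 (σ : List Char) (h7 : σ.length = 7) (hnd : σ.Nodup)
    (D : List String) (seg : List Char) (h1 : PySem.List.pyGetD D 1 "" = pvK σ pvP1)
    (h4 : PySem.List.pyGetD D 4 "" = pvK σ pvP4) (h8 : PySem.List.pyGetD D 8 "" = pvK σ pvP8) :
    pvStep2 (D, seg) (pvK σ pvP9)
      = (PySem.List.pySetD D 9 (pvK σ pvP9), PySem.List.pySetD seg 4 (pvSubst σ 'e')) := by
  unfold pvStep2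
  have hof9 := pv_ofListK σ h7 hnd pvP9 pv_subP9 pv_ndP9
  have hof1 := pv_ofListK σ h7 hnd pvP1 pv_subP1 pv_ndP1
  have hof4 := pv_ofListK σ h7 hnd pvP4 pv_subP4 pv_ndP4
  have hof8 := pv_ofListK σ h7 hnd pvP8 pv_subP8 pv_ndP8
  simp only [h1, h4, h8, pv_K_toList, hof9, hof1, hof4, hof8]
  rw [pv_interlen σ h7 hnd pvP9 pvP1 pv_subP9 pv_subP1]
  have hc : pvP9.countP (fun c => pvP1.contains c) = 2 := by rfl
  rw [hc, if_neg (by norm_num)]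
  rw [pv_difflen σ h7 hnd pvP4 pvP9 pv_subP4 pv_subP9]
  have hc2 : pvP4.countP (fun c => !pvP9.contains c) = 0 := by rfl
  rw [hc2, if_pos (by norm_num)]
  have hdiff : PySem.Set.diff (pvImgKey σ pvP8) (pvImgKey σ pvP9) = [pvSubst σ 'e'] := by
    show (pvImgKey σ pvP8).filter _ = _
    exact pv_diff_singleton σ h7 hnd pvP8 pvP9 pv_subP8 pv_subP9 'e' (by simp [pvAG])
      (by rfl) (by simp [pvP8]) (by simp [pvP9])
  rw [hdiff]
  rfl

theorem pv_step2_on0 (σ : List Char) (h7 : σ.length = 7) (hnd : σ.Nodup)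
    (D : List String) (seg : List Char) (h1 : PySem.List.pyGetD D 1 "" = pvK σ pvP1)
    (h4 : PySem.List.pyGetD D 4 "" = pvK σ pvP4) :
    pvStep2 (D, seg) (pvK σ pvP0) = (PySem.List.pySetD D 0 (pvK σ pvP0), seg) := by
  unfold pvStep2
  have hof0 := pv_ofListK σ h7 hnd pvP0 pv_subP0 pv_ndP0
  have hof1 := pv_ofListK σ h7 hnd pvP1 pv_subP1 pv_ndP1
  have hof4 := pv_ofListK σ h7 hnd pvP4 pv_subP4 pv_ndP4
  simp only [h1, h4, pv_K_toList, hof0, hof1, hof4]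
  rw [pv_interlen σ h7 hnd pvP0 pvP1 pv_subP0 pv_subP1]
  have hc : pvP0.countP (fun c => pvP1.contains c) = 2 := by rfl
  rw [hc, if_neg (by norm_num)]
  rw [pv_difflen σ h7 hnd pvP4 pvP0 pv_subP4 pv_subP0]
  have hc2 : pvP4.countP (fun c => !pvP0.contains c) = 1 := by rfl
  rw [hc2, if_neg (by norm_num)]

theorem pv_mem_img (σ : List Char) (h7 : σ.length = 7) (hnd : σ.Nodup)
    (p : List Char) (hp : ∀ x ∈ p, x ∈ pvAG) (c0 : Char) (hc0 : c0 ∈ pvAG) :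
    (pvK σ p).toList.contains (pvSubst σ c0) = decide (c0 ∈ p) := by
  rw [pv_K_toList]
  simp only [List.contains_eq_mem]
  rw [decide_eq_decide]
  exact pv_imgKey_mem σ h7 hnd p hp c0 hc0

theorem pv_step3_on2 (σ : List Char) (h7 : σ.length = 7) (hnd : σ.Nodup)
    (D : List String) (seg : List Char) (hs4 : PySem.List.pyGetD seg 4 '0' = pvSubst σ 'e') :
    pvStep3 seg D (pvK σ pvP2) = PySem.List.pySetD D 2 (pvK σ pvP2) := by
  unfold pvStep3
  rw [hs4, pv_mem_img σ h7 hnd pvP2 pv_subP2 'e' (by simp [pvAG])]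
  rw [if_pos (by simp [pvP2])]

theorem pv_step3_on3 (σ : List Char) (h7 : σ.length = 7) (hnd : σ.Nodup)
    (D : List String) (seg : List Char) (hs4 : PySem.List.pyGetD seg 4 '0' = pvSubst σ 'e')
    (hs2 : PySem.List.pyGetD seg 2 '0' = pvSubst σ 'c') :
    pvStep3 seg D (pvK σ pvP3) = PySem.List.pySetD D 3 (pvK σ pvP3) := by
  unfold pvStep3
  rw [hs4, hs2, pv_mem_img σ h7 hnd pvP3 pv_subP3 'e' (by simp [pvAG]),
    pv_mem_img σ h7 hnd pvP3 pv_subP3 'c' (by simp [pvAG])]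
  rw [if_neg (by simp [pvP3]), if_pos (by simp [pvP3])]

theorem pv_step3_on5 (σ : List Char) (h7 : σ.length = 7) (hnd : σ.Nodup)
    (D : List String) (seg : List Char) (hs4 : PySem.List.pyGetD seg 4 '0' = pvSubst σ 'e')
    (hs2 : PySem.List.pyGetD seg 2 '0' = pvSubst σ 'c') :
    pvStep3 seg D (pvK σ pvP5) = PySem.List.pySetD D 5 (pvK σ pvP5) := by
  unfold pvStep3
  rw [hs4, hs2, pv_mem_img σ h7 hnd pvP5 pv_subP5 'e' (by simp [pvAG]),
    pv_mem_img σ h7 hnd pvP5 pv_subP5 'c' (by simp [pvAG])]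
  rw [if_neg (by simp [pvP5]), if_neg (by simp [pvP5])]

def pvLenFil (n : Nat) (sigs : List String) : List String :=
  (sigs.filter (fun s => s.toList.length == n)).map pvKey

theorem pv_lenFil_cons (n : Nat) (s : String) (sigs : List String) :
    pvLenFil n (s :: sigs)
      = if s.toList.length = n then pvKey s :: pvLenFil n sigs else pvLenFil n sigs := by
  simp only [pvLenFil, List.filter_cons]
  split_ifs with h <;> simp_all

theorem pv_phase1 : ∀ (sigs : List String) (a b c e : String) (s5 s6 : List String),
    sigs.foldl pvStep1 (["", a, "", "", b, "", "", c, e, ""], s5, s6)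
      = (["", (pvLenFil 2 sigs).getLastD a, "", "", (pvLenFil 4 sigs).getLastD b, "", "",
          (pvLenFil 3 sigs).getLastD c, (pvLenFil 7 sigs).getLastD e, ""],
         s5 ++ pvLenFil 5 sigs, s6 ++ pvLenFil 6 sigs) := by
  intro sigs
  induction sigs with
  | nil => intro a b c e s5 s6; simp [pvLenFil]
  | cons s sigs ih =>
    intro a b c e s5 s6
    rw [List.foldl_cons]
    have hstr : PySem.Str.len s = (s.toList.length : Int) := by simp [PySem.Str.len]
    simp only [pvStep1, hstr]
    by_cases h2 : (s.toList.length : Int) = 2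
    · rw [if_pos h2]
      have h2' : s.toList.length = 2 := by exact_mod_cast h2
      rw [PySem.List.pySetD_of_nonneg _ _ (by norm_num : (0:Int) ≤ 1)]
      have hset : (["",a,"","",b,"","",c,e,""] : List String).set (Int.toNat 1) (pvKey s) = ["",pvKey s,"","",b,"","",c,e,""] := rfl
      rw [hset]
      rw [ih]
      simp [pv_lenFil_cons, h2', ← List.getLastD_eq_getLast?, List.getLastD_cons]
    · rw [if_neg h2]
      by_cases h3 : (s.toList.length : Int) = 3
      · rw [if_pos h3]
        have h3' : s.toList.length = 3 := by exact_mod_cast h3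
        rw [PySem.List.pySetD_of_nonneg _ _ (by norm_num : (0:Int) ≤ 7)]
        have hset : (["",a,"","",b,"","",c,e,""] : List String).set (Int.toNat 7) (pvKey s) = ["",a,"","",b,"","",pvKey s,e,""] := rfl
        rw [hset]
        rw [ih]
        simp [pv_lenFil_cons, h3', ← List.getLastD_eq_getLast?, List.getLastD_cons]
      · rw [if_neg h3]
        by_cases h4 : (s.toList.length : Int) = 4
        · rw [if_pos h4]
          have h4' : s.toList.length = 4 := by exact_mod_cast h4
          rw [PySem.List.pySetD_of_nonneg _ _ (by norm_num : (0:Int) ≤ 4)]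
          have hset : (["",a,"","",b,"","",c,e,""] : List String).set (Int.toNat 4) (pvKey s) = ["",a,"","",pvKey s,"","",c,e,""] := rfl
          rw [hset]
          rw [ih]
          simp [pv_lenFil_cons, h4', ← List.getLastD_eq_getLast?, List.getLastD_cons]
        · rw [if_neg h4]
          by_cases h5 : (s.toList.length : Int) = 5
          · rw [if_pos h5]
            have h5' : s.toList.length = 5 := by exact_mod_cast h5
            rw [ih]
            simp [pv_lenFil_cons, h5', ← List.getLastD_eq_getLast?, List.getLastD_cons]
          · rw [if_neg h5]
            by_cases h6 : (s.toList.length : Int) = 6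
            · rw [if_pos h6]
              have h6' : s.toList.length = 6 := by exact_mod_cast h6
              rw [ih]
              simp [pv_lenFil_cons, h6', ← List.getLastD_eq_getLast?, List.getLastD_cons]
            · rw [if_neg h6]
              by_cases h7 : (s.toList.length : Int) = 7
              · rw [if_pos h7]
                have h7' : s.toList.length = 7 := by exact_mod_cast h7
                rw [PySem.List.pySetD_of_nonneg _ _ (by norm_num : (0:Int) ≤ 8)]
                have hset : (["",a,"","",b,"","",c,e,""] : List String).set (Int.toNat 8) (pvKey s) = ["",a,"","",b,"","",c,pvKey s,""] := rfl
                rw [hset]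
                rw [ih]
                simp [pv_lenFil_cons, h7', ← List.getLastD_eq_getLast?, List.getLastD_cons]
              · rw [if_neg h7]
                rw [ih]
                simp only [pv_lenFil_cons]
                rw [if_neg (fun hh => h2 (by exact_mod_cast hh)),
                    if_neg (fun hh => h4 (by exact_mod_cast hh)),
                    if_neg (fun hh => h3 (by exact_mod_cast hh)),
                    if_neg (fun hh => h7 (by exact_mod_cast hh)),
                    if_neg (fun hh => h5 (by exact_mod_cast hh)),
                    if_neg (fun hh => h6 (by exact_mod_cast hh))]

theorem pv_phase2_run (σ : List Char) (h7 : σ.length = 7) (hnd : σ.Nodup)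
    (l : List String) (hl : l.Perm [pvK σ pvP0, pvK σ pvP6, pvK σ pvP9]) :
    l.foldl pvStep2 (["", pvK σ pvP1, "", "", pvK σ pvP4, "", "", pvK σ pvP7, pvK σ pvP8, ""], PySem.List.pyRepeat ['0'] 7)
      = ([pvK σ pvP0, pvK σ pvP1, "", "", pvK σ pvP4, "", pvK σ pvP6, pvK σ pvP7, pvK σ pvP8, pvK σ pvP9],
         ['0','0', pvSubst σ 'c', '0', pvSubst σ 'e', '0', '0']) := by
  have hseg : PySem.List.pyRepeat ['0'] 7 = ['0','0','0','0','0','0','0'] := rfl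
  rw [hseg]
  rcases pv_perm3 hl with h | h | h | h | h | h
  · subst h
    rw [List.foldl_cons, List.foldl_cons, List.foldl_cons, List.foldl_nil]
    rw [pv_step2_on0 σ h7 hnd _ _ (by rfl) (by rfl)]
    rw [pv_step2_on6 σ h7 hnd _ _ (by rfl)]
    rw [pv_step2_on9 σ h7 hnd _ _ (by rfl) (by rfl) (by rfl)]
    rfl
  · subst h
    rw [List.foldl_cons, List.foldl_cons, List.foldl_cons, List.foldl_nil]
    rw [pv_step2_on0 σ h7 hnd _ _ (by rfl) (by rfl)]
    rw [pv_step2_on9 σ h7 hnd _ _ (by rfl) (by rfl) (by rfl)]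
    rw [pv_step2_on6 σ h7 hnd _ _ (by rfl)]
    rfl
  · subst h
    rw [List.foldl_cons, List.foldl_cons, List.foldl_cons, List.foldl_nil]
    rw [pv_step2_on6 σ h7 hnd _ _ (by rfl)]
    rw [pv_step2_on0 σ h7 hnd _ _ (by rfl) (by rfl)]
    rw [pv_step2_on9 σ h7 hnd _ _ (by rfl) (by rfl) (by rfl)]
    rfl
  · subst h
    rw [List.foldl_cons, List.foldl_cons, List.foldl_cons, List.foldl_nil]
    rw [pv_step2_on6 σ h7 hnd _ _ (by rfl)]
    rw [pv_step2_on9 σ h7 hnd _ _ (by rfl) (by rfl) (by rfl)]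
    rw [pv_step2_on0 σ h7 hnd _ _ (by rfl) (by rfl)]
    rfl
  · subst h
    rw [List.foldl_cons, List.foldl_cons, List.foldl_cons, List.foldl_nil]
    rw [pv_step2_on9 σ h7 hnd _ _ (by rfl) (by rfl) (by rfl)]
    rw [pv_step2_on0 σ h7 hnd _ _ (by rfl) (by rfl)]
    rw [pv_step2_on6 σ h7 hnd _ _ (by rfl)]
    rfl
  · subst h
    rw [List.foldl_cons, List.foldl_cons, List.foldl_cons, List.foldl_nil]
    rw [pv_step2_on9 σ h7 hnd _ _ (by rfl) (by rfl) (by rfl)]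
    rw [pv_step2_on6 σ h7 hnd _ _ (by rfl)]
    rw [pv_step2_on0 σ h7 hnd _ _ (by rfl) (by rfl)]
    rfl

theorem pv_phase3_run (σ : List Char) (h7 : σ.length = 7) (hnd : σ.Nodup)
    (l : List String) (hl : l.Perm [pvK σ pvP2, pvK σ pvP3, pvK σ pvP5]) :
    l.foldl (pvStep3 ['0','0', pvSubst σ 'c', '0', pvSubst σ 'e', '0', '0'])
        [pvK σ pvP0, pvK σ pvP1, "", "", pvK σ pvP4, "", pvK σ pvP6, pvK σ pvP7, pvK σ pvP8, pvK σ pvP9]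
      = [pvK σ pvP0, pvK σ pvP1, pvK σ pvP2, pvK σ pvP3, pvK σ pvP4, pvK σ pvP5, pvK σ pvP6, pvK σ pvP7, pvK σ pvP8, pvK σ pvP9] := by
  rcases pv_perm3 hl with h | h | h | h | h | h
  · subst h
    rw [List.foldl_cons, List.foldl_cons, List.foldl_cons, List.foldl_nil]
    rw [pv_step3_on2 σ h7 hnd _ _ (by rfl)]
    rw [pv_step3_on3 σ h7 hnd _ _ (by rfl) (by rfl)]
    rw [pv_step3_on5 σ h7 hnd _ _ (by rfl) (by rfl)]
    rfl
  · subst h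
    rw [List.foldl_cons, List.foldl_cons, List.foldl_cons, List.foldl_nil]
    rw [pv_step3_on2 σ h7 hnd _ _ (by rfl)]
    rw [pv_step3_on5 σ h7 hnd _ _ (by rfl) (by rfl)]
    rw [pv_step3_on3 σ h7 hnd _ _ (by rfl) (by rfl)]
    rfl
  · subst h
    rw [List.foldl_cons, List.foldl_cons, List.foldl_cons, List.foldl_nil]
    rw [pv_step3_on3 σ h7 hnd _ _ (by rfl) (by rfl)]
    rw [pv_step3_on2 σ h7 hnd _ _ (by rfl)]
    rw [pv_step3_on5 σ h7 hnd _ _ (by rfl) (by rfl)]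
    rfl
  · subst h
    rw [List.foldl_cons, List.foldl_cons, List.foldl_cons, List.foldl_nil]
    rw [pv_step3_on3 σ h7 hnd _ _ (by rfl) (by rfl)]
    rw [pv_step3_on5 σ h7 hnd _ _ (by rfl) (by rfl)]
    rw [pv_step3_on2 σ h7 hnd _ _ (by rfl)]
    rfl
  · subst h
    rw [List.foldl_cons, List.foldl_cons, List.foldl_cons, List.foldl_nil]
    rw [pv_step3_on5 σ h7 hnd _ _ (by rfl) (by rfl)]
    rw [pv_step3_on2 σ h7 hnd _ _ (by rfl)]
    rw [pv_step3_on3 σ h7 hnd _ _ (by rfl) (by rfl)]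
    rfl
  · subst h
    rw [List.foldl_cons, List.foldl_cons, List.foldl_cons, List.foldl_nil]
    rw [pv_step3_on5 σ h7 hnd _ _ (by rfl) (by rfl)]
    rw [pv_step3_on3 σ h7 hnd _ _ (by rfl) (by rfl)]
    rw [pv_step3_on2 σ h7 hnd _ _ (by rfl)]
    rfl

theorem pv_lenFil_eq (n : Nat) (sigs : List String) :
    pvLenFil n sigs = ((sigs.map pvKeyL).filter (fun k => k.length == n)).map String.ofList := by
  unfold pvLenFil
  rw [List.filter_map]
  rw [List.map_map]
  congr 1
  exact List.filter_congr (fun s _ => by simp [Function.comp, pvKeyL, PySem.List.length_sorted])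

theorem pv_cfil2 (σ : List Char) : (pvCanonKeys σ).filter (fun k => k.length == 2) = [pvImgKey σ pvP1] := by
  simp [pvCanonKeys, pvPats, List.filter_cons, pv_imgKey_length, pvP0, pvP1, pvP2, pvP3, pvP4, pvP5, pvP6, pvP7, pvP8, pvP9]
theorem pv_cfil3 (σ : List Char) : (pvCanonKeys σ).filter (fun k => k.length == 3) = [pvImgKey σ pvP7] := by
  simp [pvCanonKeys, pvPats, List.filter_cons, pv_imgKey_length, pvP0, pvP1, pvP2, pvP3, pvP4, pvP5, pvP6, pvP7, pvP8, pvP9]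
theorem pv_cfil4 (σ : List Char) : (pvCanonKeys σ).filter (fun k => k.length == 4) = [pvImgKey σ pvP4] := by
  simp [pvCanonKeys, pvPats, List.filter_cons, pv_imgKey_length, pvP0, pvP1, pvP2, pvP3, pvP4, pvP5, pvP6, pvP7, pvP8, pvP9]
theorem pv_cfil7 (σ : List Char) : (pvCanonKeys σ).filter (fun k => k.length == 7) = [pvImgKey σ pvP8] := by
  simp [pvCanonKeys, pvPats, List.filter_cons, pv_imgKey_length, pvP0, pvP1, pvP2, pvP3, pvP4, pvP5, pvP6, pvP7, pvP8, pvP9]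
theorem pv_cfil5 (σ : List Char) : (pvCanonKeys σ).filter (fun k => k.length == 5) = [pvImgKey σ pvP2, pvImgKey σ pvP3, pvImgKey σ pvP5] := by
  simp [pvCanonKeys, pvPats, List.filter_cons, pv_imgKey_length, pvP0, pvP1, pvP2, pvP3, pvP4, pvP5, pvP6, pvP7, pvP8, pvP9]
theorem pv_cfil6 (σ : List Char) : (pvCanonKeys σ).filter (fun k => k.length == 6) = [pvImgKey σ pvP0, pvImgKey σ pvP6, pvImgKey σ pvP9] := by
  simp [pvCanonKeys, pvPats, List.filter_cons, pv_imgKey_length, pvP0, pvP1, pvP2, pvP3, pvP4, pvP5, pvP6, pvP7, pvP8, pvP9]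

theorem pv_lenFil_single (σ : List Char) (sigs : List String)
    (hperm : (sigs.map pvKeyL).Perm (pvCanonKeys σ)) (n : Nat) (p : List Char)
    (hc : (pvCanonKeys σ).filter (fun k => k.length == n) = [pvImgKey σ p]) :
    pvLenFil n sigs = [pvK σ p] := by
  rw [pv_lenFil_eq]
  have h := hperm.filter (fun k => k.length == n)
  rw [hc] at h
  rw [List.perm_singleton.mp h]
  rfl

theorem pv_lenFil_triple (σ : List Char) (sigs : List String)
    (hperm : (sigs.map pvKeyL).Perm (pvCanonKeys σ)) (n : Nat) (p q r : List Char)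
    (hc : (pvCanonKeys σ).filter (fun k => k.length == n) = [pvImgKey σ p, pvImgKey σ q, pvImgKey σ r]) :
    (pvLenFil n sigs).Perm [pvK σ p, pvK σ q, pvK σ r] := by
  rw [pv_lenFil_eq]
  have h := hperm.filter (fun k => k.length == n)
  rw [hc] at h
  exact h.map String.ofList

theorem pv_Amap (σ : List Char) (h7 : σ.length = 7) (hnd : σ.Nodup) (sigs : List String)
    (hperm : (sigs.map pvKeyL).Perm (pvCanonKeys σ)) :
    pvGetMapping sigs = PySem.Dict.ofList
      [(pvK σ pvP0, 0), (pvK σ pvP1, 1), (pvK σ pvP2, 2), (pvK σ pvP3, 3), (pvK σ pvP4, 4),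
       (pvK σ pvP5, 5), (pvK σ pvP6, 6), (pvK σ pvP7, 7), (pvK σ pvP8, 8), (pvK σ pvP9, 9)] := by
  unfold pvGetMapping
  have hrep : PySem.List.pyRepeat [""] 10 = (["", "", "", "", "", "", "", "", "", ""] : List String) := rfl
  rw [hrep, pv_phase1 sigs "" "" "" "" [] []]
  rw [pv_lenFil_single σ sigs hperm 2 pvP1 (pv_cfil2 σ),
      pv_lenFil_single σ sigs hperm 3 pvP7 (pv_cfil3 σ),
      pv_lenFil_single σ sigs hperm 4 pvP4 (pv_cfil4 σ),
      pv_lenFil_single σ sigs hperm 7 pvP8 (pv_cfil7 σ)]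
  have hg : ∀ (x : String), ([x] : List String).getLastD "" = x := fun _ => rfl
  rw [hg, hg, hg, hg]
  simp only [List.nil_append]
  rw [pv_phase2_run σ h7 hnd _ (pv_lenFil_triple σ sigs hperm 6 pvP0 pvP6 pvP9 (pv_cfil6 σ))]
  rw [pv_phase3_run σ h7 hnd _ (pv_lenFil_triple σ sigs hperm 5 pvP2 pvP3 pvP5 (pv_cfil5 σ))]
  congr 1
  have h10 : Int.toNat 10 = 10 := rfl
  norm_num [PySem.List.pyRange_one, List.range_succ, h10]

def pvFS (p : List Char) : Int := (p.map (fun c => ((pvPats.flatten.count c : Nat) : Int))).sum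
def pvTable : PySem.Dict Int Int :=
  PySem.Dict.ofList [(17,1),(25,7),(30,4),(34,2),(37,5),(39,3),(41,6),(42,0),(45,9),(49,8)]

theorem pv_pats_sub : ∀ p ∈ pvPats, ∀ x ∈ p, x ∈ pvAG := by
  intro p hp
  simp only [pvPats, List.mem_cons, List.not_mem_nil, or_false] at hp
  rcases hp with rfl|rfl|rfl|rfl|rfl|rfl|rfl|rfl|rfl|rfl
  exacts [pv_subP0, pv_subP1, pv_subP2, pv_subP3, pv_subP4,
          pv_subP5, pv_subP6, pv_subP7, pv_subP8, pv_subP9]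

theorem pv_flat_sub : ∀ x ∈ pvPats.flatten, x ∈ pvAG := by
  intro x hx
  obtain ⟨p, hp, hxp⟩ := List.mem_flatten.mp hx
  exact pv_pats_sub p hp x hxp

theorem pv_keys_flat_perm : ∀ (L : List String),
    (L.flatMap String.toList).Perm (L.flatMap pvKeyL) := by
  intro L
  induction L with
  | nil => simp
  | cons s L ih =>
    simp only [List.flatMap_cons]
    exact ((PySem.List.sorted_perm s.toList (fun c => c) false).symm).append ih

theorem pv_canon_flat_perm (σ : List Char) : ∀ (ps : List (List Char)),
    ((ps.map (pvImgKey σ)).flatten).Perm ((ps.map (List.map (pvSubst σ))).flatten) := by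
  intro ps
  induction ps with
  | nil => simp
  | cons p ps ih =>
    simp only [List.map_cons, List.flatten_cons]
    exact (pv_imgKey_perm σ p).append ih

theorem pv_flat_perm (σ : List Char) (sigs : List String)
    (hperm : (sigs.map pvKeyL).Perm (pvCanonKeys σ)) :
    (sigs.flatMap String.toList).Perm (pvPats.flatten.map (pvSubst σ)) := by
  refine (pv_keys_flat_perm sigs).trans ?_
  rw [List.flatMap_def]
  refine (hperm.flatten).trans ?_
  rw [List.map_flatten]
  exact pv_canon_flat_perm σ pvPats

theorem pv_count_img (σ : List Char) (h7 : σ.length = 7) (hnd : σ.Nodup)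
    (c0 : Char) (hc0 : c0 ∈ pvAG) :
    (pvPats.flatten.map (pvSubst σ)).count (pvSubst σ c0) = pvPats.flatten.count c0 := by
  rw [List.count_eq_countP, List.count_eq_countP, List.countP_map]
  refine List.countP_congr (fun x hx => ?_)
  simp only [Function.comp_apply, beq_iff_eq, decide_eq_decide]
  constructor
  · exact fun h => pv_subst_inj σ h7 hnd x (pv_flat_sub x hx) c0 hc0 h
  · exact fun h => by rw [h]

theorem pv_getD_ofList (ps : List (String × Int)) (hnd : (ps.map Prod.fst).Nodup)
    (k : String) (v : Int) (hmem : (k, v) ∈ ps) :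
    (PySem.Dict.ofList ps).getD k 0 = v := by
  have hitems : (PySem.Dict.ofList ps).items = ps := by
    have h := PySem.Dict.items_foldl_insert_fresh (l := ps) (k := Prod.fst) (v := Prod.snd)
      (d := PySem.Dict.empty) (fun a _ => by simp) hnd
    simpa [PySem.Dict.ofList, PySem.Dict.update] using h
  refine PySem.Dict.getD_of_mem_items _ ?_ ?_ 0
  · rw [hitems]; exact hmem
  · exact PySem.Dict.nodup_keys_ofList ps

theorem pv_patsBool : (pvPats.all (fun p => pvPats.all (fun q =>
    (p == q) || pvAG.any (fun c0 => (p.contains c0) != (q.contains c0))))) = true := by rfl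

theorem pv_imgKey_inj_on (σ : List Char) (h7 : σ.length = 7) (hnd : σ.Nodup) :
    ∀ p ∈ pvPats, ∀ q ∈ pvPats, pvImgKey σ p = pvImgKey σ q → p = q := by
  intro p hp q hq heq
  by_contra hne
  have h1 := List.all_eq_true.mp pv_patsBool p hp
  have h2 := List.all_eq_true.mp h1 q hq
  rw [Bool.or_eq_true] at h2
  rcases h2 with h2 | h2
  · exact hne (by simpa using h2)
  · obtain ⟨c0, hc0, hdiff⟩ := List.any_eq_true.mp h2
    have hmp := pv_imgKey_mem σ h7 hnd p (pv_pats_sub p hp) c0 hc0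
    have hmq := pv_imgKey_mem σ h7 hnd q (pv_pats_sub q hq) c0 hc0
    rw [heq, hmq] at hmp
    simp only [bne_iff_ne, ne_eq, List.contains_eq_mem] at hdiff
    exact hdiff (by rw [decide_eq_decide]; exact hmp.symm)

theorem pv_pats_nodup : pvPats.Nodup := by
  simp [pvPats, pvP0, pvP1, pvP2, pvP3, pvP4, pvP5, pvP6, pvP7]

theorem pv_canon_nodup (σ : List Char) (h7 : σ.length = 7) (hnd : σ.Nodup) :
    (pvCanonKeys σ).Nodup :=
  List.Nodup.map_on (pv_imgKey_inj_on σ h7 hnd) pv_pats_nodup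

theorem pv_canon_str_nodup (σ : List Char) (h7 : σ.length = 7) (hnd : σ.Nodup) :
    ((pvCanonKeys σ).map String.ofList).Nodup :=
  (pv_canon_nodup σ h7 hnd).map (fun {_ _} h => String.ofList_inj.mp h)

theorem pv_Bmap_getD (σ : List Char) (h7 : σ.length = 7) (hnd : σ.Nodup) (sigs : List String)
    (hperm : (sigs.map pvKeyL).Perm (pvCanonKeys σ)) (p : List Char) (hp : p ∈ pvPats)
    (d : String) (hkey : pvKeyL d = pvImgKey σ p)
    (s : String) (hsmem : s ∈ sigs) (hskey : pvKeyL s = pvKeyL d) :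
    (pvGetMappingAlt sigs).getD (pvKey d) 0 = pvTable.getD (pvFS p) 0 := by
  unfold pvGetMappingAlt
  rw [← List.foldl_flatMap]
  have hfreq : (fun ch => ((sigs.flatMap String.toList).foldl
        (fun freq ch => freq.insert ch (freq.getD ch 0 + 1)) PySem.Dict.empty).getD ch 0)
      = fun ch => (((sigs.flatMap String.toList).count ch : Nat) : Int) := by
    funext ch
    rw [PySem.Dict.getD_foldl_insert_add_one]
    simp
  have hsum : s.toList.foldl (fun acc ch =>
      acc + ((sigs.flatMap String.toList).foldl
        (fun freq ch => freq.insert ch (freq.getD ch 0 + 1)) PySem.Dict.empty).getD ch 0) 0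
      = pvFS p := by
    rw [PySem.List.foldl_add]
    simp only [hfreq, zero_add]
    have hs1 : s.toList.Perm (p.map (pvSubst σ)) := by
      refine ((PySem.List.sorted_perm s.toList (fun c => c) false).symm).trans ?_
      show (pvKeyL s).Perm _
      rw [hskey, hkey]
      exact pv_imgKey_perm σ p
    rw [(hs1.map _).sum_eq, List.map_map]
    have hflat := pv_flat_perm σ sigs hperm
    have : (p.map ((fun ch => (((sigs.flatMap String.toList).count ch : Nat) : Int)) ∘ pvSubst σ))
        = p.map (fun c => ((pvPats.flatten.count c : Nat) : Int)) := by
      refine List.map_congr_left (fun c hc => ?_)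
      simp only [Function.comp_apply]
      rw [hflat.count_eq, pv_count_img σ h7 hnd c (pv_pats_sub p hp c hc)]
    rw [this]
    rfl
  refine pv_getD_ofList _ ?_ _ _ ?_
  · rw [List.map_map]
    have hnd2 : ((sigs.map pvKeyL).map String.ofList).Nodup :=
      ((hperm.map String.ofList).nodup_iff).mpr (pv_canon_str_nodup σ h7 hnd)
    rw [List.map_map] at hnd2
    exact hnd2
  · refine List.mem_map.mpr ⟨s, hsmem, ?_⟩
    have hkd : pvKey s = pvKey d := by
      show String.ofList (pvKeyL s) = String.ofList (pvKeyL d)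
      rw [hskey]
    rw [hsum, hkd]
    rfl

theorem pv_maps_agree (sigs : List String) (h : pvValidRow sigs) (d : String)
    (hd : pvKeyL d ∈ sigs.map pvKeyL) :
    (pvGetMapping sigs).getD (pvKey d) 0 = (pvGetMappingAlt sigs).getD (pvKey d) 0 := by
  obtain ⟨σ, hσmem, hb⟩ := List.any_eq_true.mp h
  rw [Bool.and_eq_true, Bool.and_eq_true] at hb
  obtain ⟨⟨hb7, hbnd⟩, hbperm⟩ := hb
  have h7 : σ.length = 7 := by simpa using hb7
  have hnd : σ.Nodup := of_decide_eq_true hbnd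
  have hperm : (sigs.map pvKeyL).Perm (pvCanonKeys σ) := of_decide_eq_true hbperm
  have hd' : pvKeyL d ∈ pvPats.map (pvImgKey σ) := hperm.mem_iff.mp hd
  obtain ⟨p, hp, hkey⟩ := List.mem_map.mp hd'
  obtain ⟨s, hsmem, hskey⟩ := List.mem_map.mp hd
  rw [pv_Amap σ h7 hnd sigs hperm]
  rw [pv_Bmap_getD σ h7 hnd sigs hperm p hp d hkey.symm s hsmem hskey]
  have hkd : pvKey d = pvK σ p := by
    show String.ofList (pvKeyL d) = String.ofList (pvImgKey σ p)
    rw [← hkey]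
  rw [hkd]
  have hndA : (([(pvK σ pvP0, (0:Int)), (pvK σ pvP1, 1), (pvK σ pvP2, 2), (pvK σ pvP3, 3),
      (pvK σ pvP4, 4), (pvK σ pvP5, 5), (pvK σ pvP6, 6), (pvK σ pvP7, 7), (pvK σ pvP8, 8),
      (pvK σ pvP9, 9)]).map Prod.fst).Nodup := pv_canon_str_nodup σ h7 hnd
  simp only [pvPats, List.mem_cons, List.not_mem_nil, or_false] at hp
  rcases hp with rfl|rfl|rfl|rfl|rfl|rfl|rfl|rfl|rfl|rfl
  · rw [show pvK σ ['a','b','c','e','f','g'] = pvK σ pvP0 from rfl, show pvFS ['a','b','c','e','f','g'] = pvFS pvP0 from rfl]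
    rw [pv_getD_ofList _ hndA (pvK σ pvP0) 0 (by simp)]
    rfl
  · rw [show pvK σ ['c','f'] = pvK σ pvP1 from rfl, show pvFS ['c','f'] = pvFS pvP1 from rfl]
    rw [pv_getD_ofList _ hndA (pvK σ pvP1) 1 (by simp)]
    rfl
  · rw [show pvK σ ['a','c','d','e','g'] = pvK σ pvP2 from rfl, show pvFS ['a','c','d','e','g'] = pvFS pvP2 from rfl]
    rw [pv_getD_ofList _ hndA (pvK σ pvP2) 2 (by simp)]
    rfl
  · rw [show pvK σ ['a','c','d','f','g'] = pvK σ pvP3 from rfl, show pvFS ['a','c','d','f','g'] = pvFS pvP3 from rfl]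
    rw [pv_getD_ofList _ hndA (pvK σ pvP3) 3 (by simp)]
    rfl
  · rw [show pvK σ ['b','c','d','f'] = pvK σ pvP4 from rfl, show pvFS ['b','c','d','f'] = pvFS pvP4 from rfl]
    rw [pv_getD_ofList _ hndA (pvK σ pvP4) 4 (by simp)]
    rfl
  · rw [show pvK σ ['a','b','d','f','g'] = pvK σ pvP5 from rfl, show pvFS ['a','b','d','f','g'] = pvFS pvP5 from rfl]
    rw [pv_getD_ofList _ hndA (pvK σ pvP5) 5 (by simp)]
    rfl
  · rw [show pvK σ ['a','b','d','e','f','g'] = pvK σ pvP6 from rfl, show pvFS ['a','b','d','e','f','g'] = pvFS pvP6 from rfl]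
    rw [pv_getD_ofList _ hndA (pvK σ pvP6) 6 (by simp)]
    rfl
  · rw [show pvK σ ['a','c','f'] = pvK σ pvP7 from rfl, show pvFS ['a','c','f'] = pvFS pvP7 from rfl]
    rw [pv_getD_ofList _ hndA (pvK σ pvP7) 7 (by simp)]
    rfl
  · rw [show pvK σ ['a','b','c','d','e','f','g'] = pvK σ pvP8 from rfl, show pvFS ['a','b','c','d','e','f','g'] = pvFS pvP8 from rfl]
    rw [pv_getD_ofList _ hndA (pvK σ pvP8) 8 (by simp)]
    rfl
  · rw [show pvK σ ['a','b','c','d','f','g'] = pvK σ pvP9 from rfl, show pvFS ['a','b','c','d','f','g'] = pvFS pvP9 from rfl]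
    rw [pv_getD_ofList _ hndA (pvK σ pvP9) 9 (by simp)]
    rfl

theorem pv_horner_shift (g : String → Int) (out : List String) (a : Int) :
    out.foldl (fun v d => v * 10 + g d) a = a * 10 ^ out.length + out.foldl (fun v d => v * 10 + g d) 0 := by
  induction out generalizing a with
  | nil => simp
  | cons d out ih =>
    simp only [List.foldl_cons, List.length_cons]
    rw [ih (a * 10 + g d), ih (0 * 10 + g d)]
    ring

theorem pv_inner_eq (g : String → Int) : ∀ (out : List String) (s t L : Int), 0 ≤ s → s + out.length ≤ L →
    (PySem.List.enumerate out s).foldl (fun t q => t + g q.2 * 10 ^ (L - q.1 - 1).toNat) t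
      = t + (out.foldl (fun v d => v * 10 + g d) 0) * 10 ^ (L - s - out.length).toNat := by
  intro out
  induction out with
  | nil => intro s t L h0 hL; simp [PySem.List.enumerate]
  | cons d out ih =>
    intro s t L h0 hL
    rw [PySem.List.enumerate_cons, List.foldl_cons]
    rw [ih (s+1) _ L (by omega) (by simp at hL ⊢; omega)]
    rw [pv_horner_shift]
    have e1 : (L - s - 1).toNat = out.length + (L - (s+1) - out.length).toNat := by
      simp at hL; omega
    have e2 : (L - s - (d :: out).length).toNat = (L - (s+1) - out.length).toNat := by
      simp; omega
    rw [e1, e2, pow_add]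
    simp only [List.foldl_cons]
    rw [pv_horner_shift g out (0 * 10 + g d)]
    ring

theorem pv_outer_eq : ∀ (outs rest pre : List (List String)) (total : Int),
    outs.length ≤ rest.length →
    (∀ p ∈ outs.zip rest, pvValidRow p.2 ∧ ∀ d ∈ p.1, pvKeyL d ∈ p.2.map pvKeyL) →
    (PySem.List.enumerate outs (pre.length : Int)).foldl (pvAStep (pre ++ rest)) total
      = (outs.zip rest).foldl pvBStep total := by
  intro outs
  induction outs with
  | nil => intro rest pre total _ _; simp [PySem.List.enumerate]
  | cons o outs ih =>
    intro rest pre total hlen hrows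
    match rest with
    | [] => simp at hlen
    | r :: rest' =>
      rw [PySem.List.enumerate_cons, List.foldl_cons, List.zip_cons_cons, List.foldl_cons]
      have hget : PySem.List.pyGetD (pre ++ r :: rest') ((pre.length : Int)) ([] : List String) = r := by
        rw [PySem.List.pyGetD_natCast]
        simp [List.getD]
      have hrow := hrows (o, r) (by simp)
      have hstep : pvAStep (pre ++ r :: rest') total ((pre.length : Int), o) = pvBStep total (o, r) := by
        unfold pvAStep pvBStep
        simp only [hget]
        have hin := pv_inner_eq (fun dd => (pvGetMapping r).getD (pvKey dd) 0) o 0 total (o.length : Int)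
          (by omega) (by simp)
        simp only [zero_add] at hin
        have : (PySem.List.enumerate o).foldl (pvAInner (pvGetMapping r) (o.length : Int)) total
            = (PySem.List.enumerate o 0).foldl
              (fun t q => t + (fun dd => (pvGetMapping r).getD (pvKey dd) 0) q.2 * 10 ^ ((o.length : Int) - q.1 - 1).toNat) total := by
          rfl
        rw [this, hin]
        have e0 : (((o.length : Int)) - 0 - (o.length : Int)).toNat = 0 := by omega
        rw [e0, pow_zero, mul_one]
        congr 1
        exact PySem.List.foldl_congr_mem' o _ _ 0 (fun dd hdd acc => by
          rw [pv_maps_agree r hrow.1 dd (hrow.2 dd hdd)])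
      rw [hstep]
      have : (pre.length : Int) + 1 = (((pre ++ [r]).length : Nat) : Int) := by simp
      rw [this]
      have := ih rest' (pre ++ [r]) (pvBStep total (o, r)) (by simp at hlen ⊢; omega)
        (fun p hp => hrows p (by simp [hp]))
      simpa using this

-- ===== VERDICT (by name: the statement is the Claim_ definition above) =====
theorem sum_of_output_base_on_fix_configuration_spec : Claim_equal_sum_of_output_base_on_fix_configuration := by
  intro outs sigs _hdom hpre
  obtain ⟨hlen, hrows⟩ := hpre
  unfold Spec_sum_of_output_base_on_fix_configuration
  unfold sum_of_output_base_on_fix_configuration sum_of_output_base_on_fix_configuration_alt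
  have h := pv_outer_eq outs sigs [] 0 hlen hrows
  simpa using h
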